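-- pv_equiv track=rewrite | github.com/podaac/generate_partition_submit | partition_submit/partition.py | oc_time_filter
-- ===== SOURCE A (Python) =====
-- def oc_time_filter(oc_file, sst_file):
--     """Filter by OC timestamp in name."""
--
--     oc = oc_file.split(' ')[0].split('/')[-1]
--     prefix = sst_file.split(' ')[0].split('/')[-1][:24]
--     # Check if there is an oc file available within 60 seconds of sst
--     for i in range(60):
--         if len(str(i)) == 1:
--             if "NRT" in sst_file:
--                 updated_oc_file = f"{prefix}0{i}.L2.OC.NRT.nc"
--             else:
--                 updated_oc_file = f"{prefix}0{i}.L2.OC.nc"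
--         else:
--             if "NRT" in sst_file:
--                 updated_oc_file = f"{prefix}{i}.L2.OC.NRT.nc"
--             else:
--                 updated_oc_file = f"{prefix}{i}.L2.OC.nc"
--
--         if updated_oc_file == oc:
--             return True
--
--     return False
-- ===== SOURCE B (Python) =====
-- def oc_time_filter(oc_file, sst_file):
--     """Filter by OC timestamp in name."""
--     oc = oc_file.split(' ')[0].split('/')[-1]
--     prefix = sst_file.split(' ')[0].split('/')[-1][:24]
--     suffix = ".L2.OC.NRT.nc" if "NRT" in sst_file else ".L2.OC.nc"
--     if not oc.startswith(prefix):
--         return False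
--     rest = oc[len(prefix):]
--     return (len(rest) == 2 + len(suffix)
--             and rest[2:] == suffix
--             and rest[0] in "012345"
--             and rest[1] in "0123456789")
-- ===== Notes on version B (the rewrite author's own statement) =====
-- stated objective: simpler
-- what changed: Replaces the 60-iteration candidate-name generation loop with a single closed-form validation: check the prefix, then that the remainder is exactly two seconds digits (tens in 0-5, units in 0-9) followed by the fixed suffix.
import Mathlib
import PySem

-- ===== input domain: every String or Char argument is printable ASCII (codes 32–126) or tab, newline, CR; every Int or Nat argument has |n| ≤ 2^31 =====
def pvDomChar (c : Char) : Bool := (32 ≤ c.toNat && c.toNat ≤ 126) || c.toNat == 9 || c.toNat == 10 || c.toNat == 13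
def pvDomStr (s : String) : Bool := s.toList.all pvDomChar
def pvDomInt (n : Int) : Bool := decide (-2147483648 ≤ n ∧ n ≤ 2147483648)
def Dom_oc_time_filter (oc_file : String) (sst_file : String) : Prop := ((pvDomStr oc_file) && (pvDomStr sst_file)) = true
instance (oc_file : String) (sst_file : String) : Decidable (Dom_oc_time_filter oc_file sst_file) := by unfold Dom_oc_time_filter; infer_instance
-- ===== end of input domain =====

-- B replaces A's 60-iteration candidate-name loop by one closed-form validation of the
-- two seconds digits and the fixed suffix (objective: simpler).

-- ===== PORT A =====
-- shared by both Pythons' identical first two lines: s.split(' ')[0].split('/')[-1]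
-- (split with a nonempty separator always yields a nonempty list, so [0] / [-1] are total:
--  ported as headD / getLastD with default [])
def pvLastPart (s : String) : List Char :=
  ((PySem.Chars.splitOn ((PySem.Chars.splitOn s.toList [' ']).headD []) ['/']).getLastD [])

-- the candidate name A builds for second i (the f-string four-way branch, verbatim)
def pvCandA (pfx : List Char) (sst_file : String) (i : Int) : List Char :=
  if (PySem.Int.toChars i).length == 1 then
    if PySem.Str.isIn "NRT" sst_file then pfx ++ '0' :: (PySem.Int.toChars i ++ ".L2.OC.NRT.nc".toList)
    else pfx ++ '0' :: (PySem.Int.toChars i ++ ".L2.OC.nc".toList)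
  else
    if PySem.Str.isIn "NRT" sst_file then pfx ++ (PySem.Int.toChars i ++ ".L2.OC.NRT.nc".toList)
    else pfx ++ (PySem.Int.toChars i ++ ".L2.OC.nc".toList)

def oc_time_filter (oc_file : String) (sst_file : String) : Bool :=
  let oc := pvLastPart oc_file
  let pfx := PySem.List.slice (pvLastPart sst_file) none (some 24)
  -- for i in range(60): if candidate == oc: return True; return False
  (PySem.List.pyRange 0 60 1).any (fun i => pvCandA pfx sst_file i == oc)

-- ===== PORT B =====
def oc_time_filter_alt (oc_file : String) (sst_file : String) : Bool :=
  let oc := pvLastPart oc_file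
  let pfx := PySem.List.slice (pvLastPart sst_file) none (some 24)
  let suffix := if PySem.Str.isIn "NRT" sst_file then ".L2.OC.NRT.nc".toList else ".L2.OC.nc".toList
  if !(PySem.Chars.startswith oc pfx) then false
  else
    let rest := oc.drop pfx.length          -- oc[len(prefix):], index ≥ 0
    decide (rest.length = 2 + suffix.length) &&
    (PySem.List.slice rest (some 2) none == suffix) &&
    (Option.any (fun c => PySem.Chars.isIn [c] "012345".toList) (PySem.List.pyGet? rest 0)) &&
    (Option.any (fun c => PySem.Chars.isIn [c] "0123456789".toList) (PySem.List.pyGet? rest 1))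

-- ===== PRECONDITION & SPEC =====
def Spec_oc_time_filter (oc_file : String) (sst_file : String) (out : Bool) : Prop := out = oc_time_filter_alt oc_file sst_file
instance (oc_file : String) (sst_file : String) (out : Bool) : Decidable (Spec_oc_time_filter oc_file sst_file out) := by unfold Spec_oc_time_filter; infer_instance

-- ===== CLAIM (what is proved, stated in full; the proofs are below) =====
def Claim_equal_oc_time_filter : Prop := ∀ (oc_file : String) (sst_file : String), Dom_oc_time_filter oc_file sst_file → Spec_oc_time_filter oc_file sst_file (oc_time_filter oc_file sst_file)

-- ===== LEMMAS AND PROOFS =====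

-- the two-digit seconds field A writes for second i
def pvPad (i : Int) : List Char :=
  if (PySem.Int.toChars i).length == 1 then '0' :: PySem.Int.toChars i else PySem.Int.toChars i

def pvDigit1 : List Char := ['0','1','2','3','4','5']
def pvDigit2 : List Char := ['0','1','2','3','4','5','6','7','8','9']

lemma pvCandA_eq (pfx : List Char) (sst_file : String) (i : Int) :
    pvCandA pfx sst_file i =
      pfx ++ (pvPad i ++ (if PySem.Str.isIn "NRT" sst_file then ".L2.OC.NRT.nc".toList else ".L2.OC.nc".toList)) := by
  unfold pvCandA pvPad
  split_ifs <;> simp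

set_option maxRecDepth 10000 in
lemma pvPad_forms : ∀ i ∈ PySem.List.pyRange 0 60 1,
    pvPad i = [(pvPad i).getD 0 ' ', (pvPad i).getD 1 ' '] ∧
    pvDigit1.contains ((pvPad i).getD 0 ' ') = true ∧
    pvDigit2.contains ((pvPad i).getD 1 ' ') = true := by decide

set_option maxRecDepth 10000 in
lemma pvPad_exists : (pvDigit1.all (fun a => pvDigit2.all (fun b =>
    (PySem.List.pyRange 0 60 1).any (fun i => pvPad i == [a, b])))) = true := by decide

lemma pvIsIn_singleton (c : Char) (l : List Char) : PySem.Chars.isIn [c] l = true ↔ c ∈ l := by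
  rw [PySem.Chars.isIn_iff_infix]
  constructor
  · intro h; exact (List.singleton_sublist.mp h.sublist)
  · intro h
    obtain ⟨s, t, rfl⟩ := List.append_of_mem h
    exact ⟨s, t, by simp⟩

-- the core: A's 60-candidate search equals B's closed-form check, for any oc/pfx/suffix
lemma pvCore (oc pfx suffix : List Char) :
    ((PySem.List.pyRange 0 60 1).any (fun i => (pfx ++ (pvPad i ++ suffix)) == oc))
    = (if !(PySem.Chars.startswith oc pfx) then false
       else
         decide ((oc.drop pfx.length).length = 2 + suffix.length) &&
         (PySem.List.slice (oc.drop pfx.length) (some 2) none == suffix) &&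
         (Option.any (fun c => PySem.Chars.isIn [c] "012345".toList) (PySem.List.pyGet? (oc.drop pfx.length) 0)) &&
         (Option.any (fun c => PySem.Chars.isIn [c] "0123456789".toList) (PySem.List.pyGet? (oc.drop pfx.length) 1))) := by
  have hdig1 : "012345".toList = pvDigit1 := rfl
  have hdig2 : "0123456789".toList = pvDigit2 := rfl
  rw [Bool.eq_iff_iff]
  constructor
  · -- A found a candidate ⇒ B's checks pass
    intro h
    obtain ⟨i, hi, hbeq⟩ := List.any_eq_true.mp h
    obtain ⟨hform, hd1, hd2⟩ := pvPad_forms i hi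
    set a := (pvPad i).getD 0 ' ' with ha
    set b := (pvPad i).getD 1 ' ' with hb
    have hoc : oc = pfx ++ (a :: b :: suffix) := by
      rw [← beq_iff_eq.mp hbeq, hform]; rfl
    subst hoc
    have hsw : PySem.Chars.startswith (pfx ++ (a :: b :: suffix)) pfx = true :=
      (PySem.Chars.startswith_iff _ _).mpr ⟨_, rfl⟩
    have hdrop : (pfx ++ (a :: b :: suffix)).drop pfx.length = a :: b :: suffix :=
      List.drop_left
    rw [hsw, hdrop]
    have hslice : PySem.List.slice (a :: b :: suffix) (some 2) none = suffix := by
      simp [pysem]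
    have hget0 : PySem.List.pyGet? (a :: b :: suffix) 0 = some a := by simp [pysem]
    have hget1 : PySem.List.pyGet? (a :: b :: suffix) 1 = some b := by simp [pysem]
    rw [hslice, hget0, hget1, hdig1, hdig2]
    simp only [Bool.not_true, Bool.false_eq_true, if_false, List.length_cons,
      Option.any_some, Bool.and_eq_true, beq_iff_eq, decide_eq_true_eq]
    refine ⟨⟨⟨by omega, trivial⟩, ?_⟩, ?_⟩
    · exact (pvIsIn_singleton a pvDigit1).mpr (List.contains_iff_mem.mp hd1)
    · exact (pvIsIn_singleton b pvDigit2).mpr (List.contains_iff_mem.mp hd2)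
  · -- B's checks pass ⇒ A's loop finds the candidate
    intro h
    by_cases hsw : PySem.Chars.startswith oc pfx = true
    swap
    · rw [Bool.not_eq_true] at hsw; rw [hsw] at h; simp at h
    rw [hsw] at h
    simp only [Bool.not_true, Bool.false_eq_true, if_false, Bool.and_eq_true,
      decide_eq_true_eq, beq_iff_eq] at h
    obtain ⟨⟨⟨hlen, hslice⟩, hg0⟩, hg1⟩ := h
    obtain ⟨rest, hoc⟩ := (PySem.Chars.startswith_iff oc pfx).mp hsw
    have hdrop : oc.drop pfx.length = rest := by rw [← hoc]; exact List.drop_left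
    rw [hdrop] at hlen hslice hg0 hg1
    obtain ⟨a, b, t, rfl⟩ : ∃ a b t, rest = a :: b :: t := by
      match rest, hlen with
      | a :: b :: t, _ => exact ⟨a, b, t, rfl⟩
    have ht : t = suffix := by
      have : PySem.List.slice (a :: b :: t) (some 2) none = t := by simp [pysem]
      rw [this] at hslice; exact hslice
    subst ht
    have hga : PySem.List.pyGet? (a :: b :: t) 0 = some a := by simp [pysem]
    have hgb : PySem.List.pyGet? (a :: b :: t) 1 = some b := by simp [pysem]
    rw [hga] at hg0; rw [hgb] at hg1
    simp only [Option.any_some, hdig1, hdig2] at hg0 hg1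
    have hma : a ∈ pvDigit1 := (pvIsIn_singleton a pvDigit1).mp hg0
    have hmb : b ∈ pvDigit2 := (pvIsIn_singleton b pvDigit2).mp hg1
    have hex := List.all_eq_true.mp pvPad_exists a hma
    have hex2 := List.all_eq_true.mp hex b hmb
    obtain ⟨i, hi, hpad⟩ := List.any_eq_true.mp hex2
    refine List.any_eq_true.mpr ⟨i, hi, ?_⟩
    rw [beq_iff_eq, beq_iff_eq.mp hpad, ← hoc]
    rfl

-- ===== VERDICT (by name: the statement is the Claim_ definition above) =====
theorem oc_time_filter_spec : Claim_equal_oc_time_filter := by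
  intro oc_file sst_file _
  unfold Spec_oc_time_filter oc_time_filter oc_time_filter_alt
  simp only [pvCandA_eq]
  exact pvCore _ _ _
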